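-- pv_equiv track=rewrite | github.com/Wisien999/WDI2020 | extra/kol_popr/2009-2010/zad1.py | solve
-- ===== SOURCE A (Python) =====
-- def is_prime(num):
--     if num <= 1:
--         return False
--     if num == 2 or num == 3:
--         return True
--     if num%2 == 0 or num %3 == 0:
--         return False
--
--     for i in range(6, int(num**0.5)+3, 6):
--         if num % (i-1) == 0 or num % (i+1) == 0:
--             return False
--
--     return True
--
-- def solve(tab):
--     f1, f2 = 1, 1
--     prime = False
--
--     for i in range(len(tab)):
--         if i == f2:
--             f1, f2 = f2, f1+f2
--
--             if tab[i] <= 1 or is_prime(tab[i]):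
--                 return False
--         else:
--             if not prime:
--                 prime = is_prime(tab[i])
--
--     return prime
-- ===== SOURCE B (Python) =====
-- def is_prime(num):
--     if num <= 1:
--         return False
--     if num == 2 or num == 3:
--         return True
--     if num%2 == 0 or num %3 == 0:
--         return False
--
--     for i in range(6, int(num**0.5)+3, 6):
--         if num % (i-1) == 0 or num % (i+1) == 0:
--             return False
--
--     return True
--
-- def solve(tab):
--     n = len(tab)
--     fibs = []
--     a, b = 1, 1
--     while b < n:
--         fibs.append(b)
--         a, b = b, a + b
--     if any(tab[i] <= 1 or is_prime(tab[i]) for i in fibs):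
--         return False
--     return any(is_prime(tab[i]) for i in range(n) if i not in fibs)
-- ===== Notes on version B (the rewrite author's own statement) =====
-- stated objective: simpler
-- what changed: A's single interleaved loop carrying mutable Fibonacci state and a prime flag is replaced by first materialising the list of Fibonacci indices below len(tab), then two independent any() passes over the index partition (Fibonacci-indexed elements must be composite >1; some non-Fibonacci-indexed element must be prime).
import Mathlib
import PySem

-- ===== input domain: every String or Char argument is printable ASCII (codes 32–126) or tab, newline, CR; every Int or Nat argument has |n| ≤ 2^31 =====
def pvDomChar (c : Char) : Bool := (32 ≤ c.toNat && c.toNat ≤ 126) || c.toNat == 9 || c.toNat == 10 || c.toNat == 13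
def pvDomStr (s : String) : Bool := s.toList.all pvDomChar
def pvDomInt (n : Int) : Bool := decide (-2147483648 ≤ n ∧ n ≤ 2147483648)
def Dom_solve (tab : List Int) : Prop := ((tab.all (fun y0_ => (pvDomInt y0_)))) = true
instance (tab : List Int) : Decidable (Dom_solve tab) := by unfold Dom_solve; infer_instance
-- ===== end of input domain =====

-- B replaces A's single interleaved loop (mutable Fibonacci state + prime flag) by building the
-- list of Fibonacci indices below len(tab) first and then making two independent any() passes
-- over the index partition; objective: simpler. Equal return value on every input.

-- ===== PORT A =====
-- is_prime is shared verbatim by Source A and Source B, so both ports use this one helper.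
-- int(num**0.5): exact as Nat.sqrt on the domain |num| ≤ 2^31 (double sqrt is correctly
-- rounded and the gap to the next integer exceeds one ulp there); num > 3 when reached.
def isPrime (num : Int) : Bool :=
  if num ≤ 1 then false
  else if num == 2 || num == 3 then true
  else if PySem.Int.mod num 2 == 0 || PySem.Int.mod num 3 == 0 then false
  else !((PySem.List.pyRange 6 ((Nat.sqrt num.toNat : Int) + 3) 6).any
          (fun i => PySem.Int.mod num (i - 1) == 0 || PySem.Int.mod num (i + 1) == 0))

-- A's for-loop with early return, as structural recursion over the index i with state (f1, f2, prime).
def solveLoop (tab : List Int) (i : Nat) (f1 f2 : Int) (prime : Bool) : Bool :=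
  if h : i < tab.length then
    if (i : Int) == f2 then
      if tab[i] ≤ 1 || isPrime tab[i] then false
      else solveLoop tab (i + 1) f2 (f1 + f2) prime
    else solveLoop tab (i + 1) f1 f2 (if prime then prime else isPrime tab[i])
  else prime
termination_by tab.length - i

def solve (tab : List Int) : Bool := solveLoop tab 0 1 1 false

-- ===== PORT B =====
-- Source B's while-loop collecting Fibonacci indices b < n (a,b start at 1,1); the fuel argument
-- (set to n) is only a totality guard: b strictly increases by a ≥ 1 each step.
def fibsBelow : Nat → Nat → Nat → Nat → List Nat
  | 0, _, _, _ => []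
  | fuel + 1, n, a, b => if b < n then b :: fibsBelow fuel n b (a + b) else []

def solve_alt (tab : List Int) : Bool :=
  let n := tab.length
  let fibs := fibsBelow n n 1 1
  if fibs.any (fun i => tab.getD i 0 ≤ 1 || isPrime (tab.getD i 0)) then false
  else (List.range n).any (fun i => !fibs.contains i && isPrime (tab.getD i 0))

-- ===== PRECONDITION & SPEC =====
def Spec_solve (tab : List Int) (out : Bool) : Prop := out = solve_alt tab
instance (tab : List Int) (out : Bool) : Decidable (Spec_solve tab out) := by unfold Spec_solve; infer_instance

-- ===== CLAIM (what is proved, stated in full; the proofs are below) =====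
def Claim_equal_solve : Prop := ∀ (tab : List Int), Dom_solve tab → Spec_solve tab (solve tab)

-- ===== LEMMAS AND PROOFS =====

lemma any_congr_mem {α : Type} (p q : α → Bool) : ∀ (l : List α), (∀ a ∈ l, p a = q a) → l.any p = l.any q
  | [], _ => rfl
  | x :: xs, h => by
    simp only [List.any_cons, h x (List.mem_cons_self ..),
      any_congr_mem p q xs (fun a ha => h a (List.mem_cons_of_mem _ ha))]

lemma fibsBelow_nil (fuel n a b : Nat) (h : ¬ b < n) : fibsBelow fuel n a b = [] := by
  cases fuel <;> simp [fibsBelow, h]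

lemma fibsBelow_fuel (fuel : Nat) : ∀ fuel' a b, 1 ≤ a → 1 ≤ b →
    (n : Nat) → n - b ≤ fuel → n - b ≤ fuel' →
    fibsBelow fuel n a b = fibsBelow fuel' n a b := by
  induction fuel with
  | zero =>
    intro fuel' a b _ _ n h _
    rw [fibsBelow_nil, fibsBelow_nil] <;> omega
  | succ fu ih =>
    intro fuel' a b ha hb n h h'
    by_cases hbn : b < n
    · obtain ⟨f', rfl⟩ : ∃ f', fuel' = f' + 1 := ⟨fuel' - 1, by omega⟩
      simp only [fibsBelow, if_pos hbn]
      rw [ih f' b (a + b) hb (by omega) n (by omega) (by omega)]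
    · rw [fibsBelow_nil _ _ _ _ hbn, fibsBelow_nil _ _ _ _ hbn]

lemma fibsBelow_cons {n a b : Nat} (ha : 1 ≤ a) (hb : 1 ≤ b) (hbn : b < n) :
    fibsBelow n n a b = b :: fibsBelow n n b (a + b) := by
  obtain ⟨m, rfl⟩ : ∃ m, n = m + 1 := ⟨n - 1, by omega⟩
  conv_lhs => rw [show fibsBelow (m + 1) (m + 1) a b
    = if b < m + 1 then b :: fibsBelow m (m + 1) b (a + b) else [] from rfl]
  rw [if_pos hbn, fibsBelow_fuel m (m + 1) b (a + b) hb (by omega) (m + 1) (by omega) (by omega)]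

lemma mem_fibsBelow (fuel : Nat) : ∀ n a b j, j ∈ fibsBelow fuel n a b → b ≤ j ∧ j < n := by
  induction fuel with
  | zero => intro n a b j hj; simp [fibsBelow] at hj
  | succ fu ih =>
    intro n a b j hj
    simp only [fibsBelow] at hj
    split at hj
    · rcases List.mem_cons.mp hj with rfl | hj
      · omega
      · have := ih n b (a + b) j hj; omega
    · simp at hj

lemma not_contains_fibsBelow {fuel n a b j : Nat} (hj : j < b) :
    (fibsBelow fuel n a b).contains j = false := by
  simp only [List.contains_eq_mem, decide_eq_false_iff_not]
  intro h
  have := mem_fibsBelow fuel n a b j h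
  omega

-- The loop invariant: from state (f1, f2) = (a, b) with i ≤ b, 1 ≤ a ≤ b, A's remaining loop
-- equals B's two-pass form restricted to indices ≥ i (whose Fibonacci members are exactly fibsBelow n n a b).
lemma loop_eq (tab : List Int) (k : Nat) : ∀ (i a b : Nat) (prime : Bool),
    tab.length - i ≤ k → i ≤ b → 1 ≤ a → a ≤ b →
    solveLoop tab i (a : Int) (b : Int) prime =
      (if (fibsBelow tab.length tab.length a b).any
            (fun j => tab.getD j 0 ≤ 1 || isPrime (tab.getD j 0)) then false
       else prime || (List.range' i (tab.length - i)).any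
            (fun j => !(fibsBelow tab.length tab.length a b).contains j && isPrime (tab.getD j 0))) := by
  induction k with
  | zero =>
    intro i a b prime hk hib ha hab
    have hi : ¬ i < tab.length := by omega
    rw [solveLoop, dif_neg hi, fibsBelow_nil _ _ _ _ (by omega)]
    simp [show tab.length - i = 0 by omega]
  | succ k ih =>
    intro i a b prime hk hib ha hab
    by_cases hi : i < tab.length
    · have hrange : List.range' i (tab.length - i) = i :: List.range' (i + 1) (tab.length - (i + 1)) := by
        rw [show tab.length - i = (tab.length - (i + 1)) + 1 by omega, List.range'_succ]
      by_cases hib' : i = b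
      · subst hib'
        have hcons := fibsBelow_cons ha (by omega) hi
        rw [solveLoop, dif_pos hi, if_pos (by simp)]
        have hgetD : tab.getD i 0 = tab[i] := List.getD_eq_getElem tab 0 hi
        by_cases hbad : (tab[i] ≤ 1 || isPrime tab[i]) = true
        · rw [if_pos hbad, hcons]
          simp only [List.any_cons, hgetD, hbad, Bool.true_or, if_pos]
        · rw [if_neg hbad]
          have hrec := ih (i + 1) i (a + i) prime (by omega) (by omega) (by omega) (by omega)
          rw [show ((a : Int) + (i : Int)) = ((a + i : Nat) : Int) by push_cast; ring, hrec, hcons]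
          simp only [List.any_cons, hgetD, hbad, Bool.false_or]
          by_cases hany : (fibsBelow tab.length tab.length i (a + i)).any
              (fun j => tab.getD j 0 ≤ 1 || isPrime (tab.getD j 0)) = true
          · rw [if_pos hany, if_pos hany]
          · rw [if_neg hany, if_neg (by simpa using hany)]
            congr 1
            rw [hrange]
            simp only [List.any_cons, List.contains_cons, beq_self_eq_true, Bool.true_or,
              Bool.not_true, Bool.false_and, Bool.false_or]
            refine any_congr_mem _ _ _ (fun j hj => ?_)
            have hj' : i + 1 ≤ j := (List.mem_range'_1.mp hj).1
            have hne : (j == i) = false := by simpa using show j ≠ i by omega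
            simp [hne]
      · have hib2 : i < b := by omega
        rw [solveLoop, dif_pos hi, if_neg (by simp; omega)]
        have hrec := ih (i + 1) a b (if prime then prime else isPrime tab[i])
          (by omega) (by omega) ha hab
        rw [hrec]
        have hgetD : tab.getD i 0 = tab[i] := List.getD_eq_getElem tab 0 hi
        by_cases hany : (fibsBelow tab.length tab.length a b).any
            (fun j => tab.getD j 0 ≤ 1 || isPrime (tab.getD j 0)) = true
        · rw [if_pos hany, if_pos hany]
        · rw [if_neg hany, if_neg hany]
          rw [hrange]
          simp only [List.any_cons, not_contains_fibsBelow hib2, Bool.not_false, Bool.true_and, hgetD]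
          cases prime <;> simp
    · rw [solveLoop, dif_neg hi, fibsBelow_nil _ _ _ _ (by omega)]
      simp [show tab.length - i = 0 by omega]

-- ===== VERDICT (by name: the statement is the Claim_ definition above) =====
theorem solve_spec : Claim_equal_solve := by
  intro tab _
  unfold Spec_solve solve
  have h := loop_eq tab tab.length 0 1 1 false (by omega) (by omega) (by omega) (by omega)
  simp only [Nat.cast_one] at h
  rw [h]
  simp [solve_alt, List.range_eq_range']
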